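-- pv_equiv track=rewrite | github.com/nberserk/codejam | java/src/main/java/codejam/matrygons.py | solve
-- ===== SOURCE A (Python) =====
-- def solve(cache, n):
--     if n<3:
--         return 0
--     if n==3:
--         return 1
--     if cache[n] != -1:
--         return cache[n]
--     ret = 0
--     for i in range(2, int(n/2)):
--         if n%i ==0:
--             if i>=3 or n/i >=3:
--                 ret = max(ret, 1+solve(cache, n-i))
--
--     cache[n] = ret
--     return ret
-- ===== SOURCE B (Python) =====
-- def solve(cache, n):
--     if n < 3:
--         return 0
--     if n == 3:
--         return 1
--     if cache[n] != -1:
--         return cache[n]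
--     # bottom-up: table[k] = answer for state k, built left to right (cache not mutated)
--     table = []
--     for k in range(n + 1):
--         if k < 3:
--             v = 0
--         elif k == 3:
--             v = 1
--         elif cache[k] != -1:
--             v = cache[k]
--         else:
--             v = 0
--             for i in range(2, k // 2):
--                 if k % i == 0 and (i >= 3 or k // i >= 3):
--                     c = 1 + table[k - i]
--                     if v < c:
--                         v = c
--         table.append(v)
--     return table[n]
-- ===== Notes on version B (the rewrite author's own statement) =====
-- stated objective: alternative
-- what changed: replaces A's top-down memoized recursion that mutates the caller's cache list with an iterative bottom-up dynamic-programming pass that fills a fresh table from 0 to n (after the same O(1) cache fast path), leaving the cache untouched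
import Mathlib
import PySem

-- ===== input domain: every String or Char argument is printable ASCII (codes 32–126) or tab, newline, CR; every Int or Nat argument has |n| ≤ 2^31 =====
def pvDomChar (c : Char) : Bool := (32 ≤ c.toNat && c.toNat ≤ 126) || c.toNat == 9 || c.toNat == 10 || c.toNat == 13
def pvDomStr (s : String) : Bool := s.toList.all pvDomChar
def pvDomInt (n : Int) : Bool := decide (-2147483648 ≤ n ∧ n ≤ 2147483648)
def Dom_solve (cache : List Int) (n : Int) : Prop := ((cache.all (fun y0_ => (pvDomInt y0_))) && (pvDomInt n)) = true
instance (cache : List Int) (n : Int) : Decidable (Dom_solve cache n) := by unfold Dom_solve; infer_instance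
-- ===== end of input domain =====

-- B replaces A's top-down memoized recursion (which mutates the caller's cache list) by an
-- iterative bottom-up DP table built from 0 to n; equivalence is about the RETURN value only
-- (A writes computed entries into `cache`, B never mutates it).


-- ===== PORT A =====
-- fuel ≥ n.toNat + 1 is always enough: every recursive call decreases n by at least 2
def solveAuxA : Nat → List Int → Int → Int × List Int
  | 0, c, _ => (0, c)
  | fuel+1, c, n =>
    if n < 3 then (0, c)
    else if n = 3 then (1, c)
    else
      match PySem.List.pyGet? c n with
      | none => (0, c)     -- Python raises IndexError here; excluded by Pre_solve
      | some cv =>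
        if cv ≠ -1 then (cv, c)
        else
          let p := (PySem.List.pyRange 2 (PySem.Int.floordiv n 2) 1).foldl
            (fun (s : Int × List Int) i =>
              if PySem.Int.mod n i = 0 then
                if 3 ≤ i ∨ 3 ≤ PySem.Int.floordiv n i then
                  let r := solveAuxA fuel s.2 (n - i)
                  (max s.1 (1 + r.1), r.2)
                else s
              else s) (0, c)
          (p.1, PySem.List.pySetD p.2 n p.1)

def solve (cache : List Int) (n : Int) : Int := (solveAuxA (n.toNat + 1) cache n).1

-- ===== PORT B =====
def solve_alt (cache : List Int) (n : Int) : Int :=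
  if n < 3 then 0
  else if n = 3 then 1
  else
    match PySem.List.pyGet? cache n with
    | none => 0            -- Python raises IndexError here; excluded by Pre_solve
    | some cv =>
      if cv ≠ -1 then cv
      else
        let table := (PySem.List.pyRange 0 (n + 1) 1).foldl
          (fun (t : List Int) k =>
            let v : Int :=
              if k < 3 then 0
              else if k = 3 then 1
              else
                match PySem.List.pyGet? cache k with
                | none => 0
                | some w =>
                  if w ≠ -1 then w
                  else
                    (PySem.List.pyRange 2 (PySem.Int.floordiv k 2) 1).foldl
                      (fun v i =>
                        if PySem.Int.mod k i = 0 then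
                          if 3 ≤ i ∨ 3 ≤ PySem.Int.floordiv k i then
                            let c := 1 + PySem.List.pyGetD t (k - i) 0
                            if v < c then c else v
                          else v
                        else v) 0
            t ++ [v]) []
        PySem.List.pyGetD table n 0

-- ===== PRECONDITION & SPEC =====
-- A raises IndexError (cache[n] out of range) exactly when 4 ≤ n and cache.length ≤ n;
-- Pre_solve excludes exactly those inputs and nothing else.
def Pre_solve (cache : List Int) (n : Int) : Prop := n ≤ 3 ∨ n < (cache.length : Int)
instance (cache : List Int) (n : Int) : Decidable (Pre_solve cache n) := by unfold Pre_solve; infer_instance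
def pvWitness_solve : List Int × Int := ([-1, -1, -1, -1, -1, -1, -1, -1, -1, -1, -1, -1, -1], 12)

def Spec_solve (cache : List Int) (n : Int) (out : Int) : Prop := out = solve_alt cache n
instance (cache : List Int) (n : Int) (out : Int) : Decidable (Spec_solve cache n out) := by unfold Spec_solve; infer_instance

-- ===== CLAIM (what is proved, stated in full; the proofs are below) =====
def Claim_equal_solve : Prop := ∀ (cache : List Int) (n : Int), Dom_solve cache n → Pre_solve cache n → Spec_solve cache n (solve cache n)

-- ===== LEMMAS AND PROOFS =====

-- pure (cache0-only) value function: what A returns, stripped of cache mutation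
def valF : Nat → List Int → Int → Int
  | 0, _, _ => 0
  | fuel+1, c0, n =>
    if n < 3 then 0
    else if n = 3 then 1
    else
      match PySem.List.pyGet? c0 n with
      | none => 0
      | some cv =>
        if cv ≠ -1 then cv
        else
          (PySem.List.pyRange 2 (PySem.Int.floordiv n 2) 1).foldl
            (fun v i =>
              if PySem.Int.mod n i = 0 then
                if 3 ≤ i ∨ 3 ≤ PySem.Int.floordiv n i then
                  max v (1 + valF fuel c0 (n - i))
                else v
              else v) 0

lemma if_lt_eq_max (a b : Int) : (if a < b then b else a) = max a b := by
  rw [max_def]; split_ifs <;> omega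

lemma valF_fuel_congr : ∀ (f f' : Nat) (c0 : List Int) (n : Int),
    n.toNat < f → n.toNat < f' → valF f c0 n = valF f' c0 n := by
  intro f
  induction f using Nat.strong_induction_on with
  | _ f IH =>
    intro f' c0 n hf hf'
    cases f with
    | zero => omega
    | succ g =>
      cases f' with
      | zero => omega
      | succ g' =>
        simp only [valF]
        by_cases h3 : n < 3
        · simp [h3]
        by_cases he : n = 3
        · simp [he]
        simp only [if_neg h3, if_neg he]
        cases hget : PySem.List.pyGet? c0 n with
        | none => rfl
        | some cv =>
          by_cases hcv : cv = -1
          · simp only [hcv, ne_eq, not_true_eq_false, if_false]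
            have hfd : PySem.Int.floordiv n 2 = n / 2 :=
              PySem.Int.floordiv_eq_ediv_of_pos (by omega)
            apply List.foldl_ext
            intro v i hi
            rw [PySem.List.mem_pyRange_one, hfd] at hi
            by_cases hm : PySem.Int.mod n i = 0
            · by_cases hg : (3 ≤ i ∨ 3 ≤ PySem.Int.floordiv n i)
              · simp only [if_pos hm, if_pos hg]
                rw [IH g (by omega) g' c0 (n - i) (by omega) (by omega)]
              · simp [hm, hg]
            · simp [hm]
          · simp [hcv]

-- cache compatibility invariant: entries are either the original ones or memoized values
def compat (c0 cs : List Int) : Prop :=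
  cs.length = c0.length ∧
  ∀ j : Nat, cs[j]? = c0[j]? ∨ (c0[j]? = some (-1) ∧ cs[j]? = some (valF (j+1) c0 (j : Int)))

lemma A_main : ∀ (fuel : Nat) (c0 cs : List Int) (n : Int),
    n.toNat < fuel → compat c0 cs →
    (solveAuxA fuel cs n).1 = valF fuel c0 n ∧ compat c0 (solveAuxA fuel cs n).2 := by
  intro fuel
  induction fuel using Nat.strong_induction_on with
  | _ fuel IH =>
    intro c0 cs n hf hc
    cases fuel with
    | zero => omega
    | succ g =>
      by_cases h3 : n < 3
      · simp only [solveAuxA, valF, if_pos h3]; exact ⟨trivial, hc⟩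
      by_cases he : n = 3
      · simp only [solveAuxA, valF, if_neg h3, if_pos he]; exact ⟨trivial, hc⟩
      have hn4 : 4 ≤ n := by omega
      have hlen : cs.length = c0.length := hc.1
      have hcsg : PySem.List.pyGet? cs n = cs[n.toNat]? := PySem.List.pyGet?_of_nonneg cs (by omega)
      have hc0g : PySem.List.pyGet? c0 n = c0[n.toNat]? := PySem.List.pyGet?_of_nonneg c0 (by omega)
      have hfd : PySem.Int.floordiv n 2 = n / 2 := PySem.Int.floordiv_eq_ediv_of_pos (by omega)
      have key : ∀ (l : List Int), (∀ i ∈ l, 2 ≤ i ∧ i < n / 2) → ∀ (r : Int) (cc : List Int), compat c0 cc →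
          (l.foldl (fun (s : Int × List Int) i =>
              if PySem.Int.mod n i = 0 then
                if 3 ≤ i ∨ 3 ≤ PySem.Int.floordiv n i then
                  (max s.1 (1 + (solveAuxA g s.2 (n - i)).1), (solveAuxA g s.2 (n - i)).2)
                else s
              else s) (r, cc)).1
            = l.foldl (fun v i =>
              if PySem.Int.mod n i = 0 then
                if 3 ≤ i ∨ 3 ≤ PySem.Int.floordiv n i then
                  max v (1 + valF g c0 (n - i))
                else v
              else v) r
          ∧ compat c0 (l.foldl (fun (s : Int × List Int) i =>
              if PySem.Int.mod n i = 0 then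
                if 3 ≤ i ∨ 3 ≤ PySem.Int.floordiv n i then
                  (max s.1 (1 + (solveAuxA g s.2 (n - i)).1), (solveAuxA g s.2 (n - i)).2)
                else s
              else s) (r, cc)).2 := by
        intro l
        induction l with
        | nil => intro _ r cc hcc; exact ⟨rfl, hcc⟩
        | cons i tl ihl =>
          intro hmem r cc hcc
          obtain ⟨hi2, hilt⟩ := hmem i (List.mem_cons_self ..)
          have hmem' : ∀ j ∈ tl, 2 ≤ j ∧ j < n / 2 :=
            fun j hj => hmem j (List.mem_cons_of_mem _ hj)
          simp only [List.foldl_cons]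
          by_cases hm : PySem.Int.mod n i = 0
          · by_cases hg : (3 ≤ i ∨ 3 ≤ PySem.Int.floordiv n i)
            · simp only [if_pos hm, if_pos hg]
              obtain ⟨hr1, hr2⟩ := IH g (by omega) c0 cc (n - i) (by omega) hcc
              rw [hr1]
              exact ihl hmem' _ _ hr2
            · simp only [if_neg hg, if_pos hm]
              exact ihl hmem' r cc hcc
          · simp only [if_neg hm]
            exact ihl hmem' r cc hcc
      cases hc0n : c0[n.toNat]? with
      | none =>
        have hcsn : cs[n.toNat]? = none := by
          rw [List.getElem?_eq_none_iff] at hc0n ⊢; omega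
        refine ⟨?_, ?_⟩
        · simp only [solveAuxA, valF, if_neg h3, if_neg he, hcsg, hc0g, hc0n, hcsn]
        · simp only [solveAuxA, if_neg h3, if_neg he, hcsg, hcsn]; exact hc
      | some w0 =>
        have hlt0 : n.toNat < c0.length := by
          by_contra hcon
          rw [List.getElem?_eq_none_iff.mpr (by omega)] at hc0n
          simp at hc0n
        obtain ⟨w, hcsn⟩ : ∃ w, cs[n.toNat]? = some w :=
          ⟨cs[n.toNat]'(by omega), List.getElem?_eq_getElem (by omega)⟩
        have hvalF : valF (g+1) c0 n =
            (if w0 ≠ -1 then w0 else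
              (PySem.List.pyRange 2 (PySem.Int.floordiv n 2) 1).foldl
                (fun v i =>
                  if PySem.Int.mod n i = 0 then
                    if 3 ≤ i ∨ 3 ≤ PySem.Int.floordiv n i then
                      max v (1 + valF g c0 (n - i))
                    else v
                  else v) 0) := by
          simp only [valF, if_neg h3, if_neg he, hc0g, hc0n]
        have hcast : ((n.toNat : Int)) = n := Int.toNat_of_nonneg (by omega)
        have hmemL : ∀ i ∈ PySem.List.pyRange 2 (PySem.Int.floordiv n 2) 1, 2 ≤ i ∧ i < n / 2 := by
          intro i hi; rw [PySem.List.mem_pyRange_one, hfd] at hi; exact hi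
        by_cases hw : w = -1
        · -- cache miss: recompute the loop
          have hw0 : w0 = -1 := by
            rcases hc.2 n.toNat with hj | ⟨hj0, _⟩
            · rw [hcsn, hc0n] at hj; cases hj; omega
            · rw [hc0n] at hj0; cases hj0; rfl
          obtain ⟨hP1, hP2⟩ := key _ hmemL 0 cs hc
          simp only [solveAuxA, if_neg h3, if_neg he, hcsg, hcsn, hw, ne_eq,
            not_true_eq_false, if_false]
          have hLv : valF (g+1) c0 n =
              (PySem.List.pyRange 2 (PySem.Int.floordiv n 2) 1).foldl
                (fun v i =>
                  if PySem.Int.mod n i = 0 then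
                    if 3 ≤ i ∨ 3 ≤ PySem.Int.floordiv n i then
                      max v (1 + valF g c0 (n - i))
                    else v
                  else v) 0 := by
            rw [hvalF, if_neg (by simp [hw0])]
          refine ⟨by rw [hLv]; exact hP1, ?_⟩
          rw [PySem.List.pySetD_of_nonneg _ _ (by omega : (0:Int) ≤ n)]
          refine ⟨by rw [List.length_set]; exact hP2.1, ?_⟩
          intro j
          by_cases hj : j = n.toNat
          · subst hj
            right
            refine ⟨by rw [hc0n, hw0], ?_⟩
            rw [List.getElem?_set_self (by rw [hP2.1]; omega)]
            congr 1
            rw [hP1, ← hLv, hcast]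
            exact (valF_fuel_congr (g+1) (n.toNat+1) c0 n (by omega) (by omega))
          · rw [List.getElem?_set_ne (by omega)]
            exact hP2.2 j
        · -- cache hit in cs
          simp only [solveAuxA, if_neg h3, if_neg he, hcsg, hcsn, ne_eq, hw, not_false_eq_true,
            if_true]
          refine ⟨?_, hc⟩
          rcases hc.2 n.toNat with hj | ⟨hj0, hjv⟩
          · have hww : w = w0 := by rw [hcsn, hc0n] at hj; cases hj; rfl
            rw [hvalF, if_pos (by omega : w0 ≠ -1)]
            exact hww
          · have hw0 : w0 = -1 := by rw [hc0n] at hj0; cases hj0; rfl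
            have hwv : w = valF (n.toNat+1) c0 ((n.toNat : Int)) := by
              rw [hcsn] at hjv; cases hjv; rfl
            rw [hvalF, if_neg (by simp [hw0])]
            rw [hwv, hcast, valF_fuel_congr (n.toNat+1) (g+1) c0 n (by omega) (by omega), hvalF,
              if_neg (by simp [hw0])]

lemma B_table (cache : List Int) : ∀ N : Nat,
    (PySem.List.pyRange 0 (N : Int) 1).foldl
      (fun (t : List Int) k =>
        let v : Int :=
          if k < 3 then 0
          else if k = 3 then 1
          else
            match PySem.List.pyGet? cache k with
            | none => 0
            | some w =>
              if w ≠ -1 then w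
              else
                (PySem.List.pyRange 2 (PySem.Int.floordiv k 2) 1).foldl
                  (fun v i =>
                    if PySem.Int.mod k i = 0 then
                      if 3 ≤ i ∨ 3 ≤ PySem.Int.floordiv k i then
                        let c := 1 + PySem.List.pyGetD t (k - i) 0
                        if v < c then c else v
                      else v
                    else v) 0
        t ++ [v]) []
    = (List.range N).map (fun j => valF (j+1) cache (j : Int)) := by
  intro N
  induction N with
  | zero => simp [PySem.List.pyRange_one_eq_nil (by omega : (0:Int) ≤ 0)]
  | succ N ihN =>
    have hsplit : PySem.List.pyRange 0 (((N+1 : Nat)) : Int) 1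
        = PySem.List.pyRange 0 (N : Int) 1 ++ [(N : Int)] := by
      push_cast
      exact PySem.List.pyRange_one_succ_right (by positivity)
    rw [hsplit, List.foldl_append, ihN, List.range_succ, List.map_append]
    simp only [List.foldl_cons, List.foldl_nil, List.map_cons, List.map_nil]
    congr 1
    congr 1
    by_cases hN3 : (N : Int) < 3
    · rw [if_pos hN3]
      simp only [valF, if_pos hN3]
    by_cases hNe : (N : Int) = 3
    · rw [if_neg hN3, if_pos hNe]
      simp only [valF, if_neg hN3, if_pos hNe]
    have hN4 : 4 ≤ (N : Int) := by omega
    have hfd : PySem.Int.floordiv (N : Int) 2 = (N : Int) / 2 :=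
      PySem.Int.floordiv_eq_ediv_of_pos (by omega)
    rw [if_neg hN3, if_neg hNe]
    cases hg : PySem.List.pyGet? cache (N : Int) with
    | none =>
      simp only [valF, if_neg hN3, if_neg hNe, hg]
    | some w =>
      by_cases hw : w = -1
      · have hv : valF (N+1) cache (N : Int) =
            (PySem.List.pyRange 2 (PySem.Int.floordiv (N : Int) 2) 1).foldl
              (fun v i =>
                if PySem.Int.mod (N : Int) i = 0 then
                  if 3 ≤ i ∨ 3 ≤ PySem.Int.floordiv (N : Int) i then
                    max v (1 + valF N cache ((N : Int) - i))
                  else v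
                else v) 0 := by
          simp only [valF, if_neg hN3, if_neg hNe, hg, hw, ne_eq, not_true_eq_false, if_false]
        simp only [hw, ne_eq, not_true_eq_false, if_false, hv]
        apply List.foldl_ext
        intro v i hi
        rw [PySem.List.mem_pyRange_one, hfd] at hi
        by_cases hm : PySem.Int.mod (N : Int) i = 0
        · by_cases hgd : (3 ≤ i ∨ 3 ≤ PySem.Int.floordiv (N : Int) i)
          · rw [if_pos hm, if_pos hgd, if_pos hm, if_pos hgd]
            have h0i : (0:Int) ≤ (N : Int) - i := by omega
            have hlt : ((N : Int) - i) <
                ((((List.range N).map (fun j => valF (j+1) cache (j : Int))).length : Nat) : Int) := by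
              simp; omega
            rw [PySem.List.pyGetD_eq_getElem _ _ h0i hlt]
            have hgetm : ((List.range N).map (fun j => valF (j+1) cache (j : Int)))[((N : Int) - i).toNat]'(by simp; omega)
                = valF (((N : Int) - i).toNat + 1) cache ((((N : Int) - i).toNat : Nat) : Int) := by
              simp
            rw [hgetm, Int.toNat_of_nonneg h0i,
              valF_fuel_congr (((N : Int) - i).toNat + 1) N cache ((N : Int) - i)
                (by omega) (by omega)]
            exact if_lt_eq_max v _
          · rw [if_pos hm, if_neg hgd, if_pos hm, if_neg hgd]
        · rw [if_neg hm, if_neg hm]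
      · simp only [valF, if_neg hN3, if_neg hNe, hg, hw, ne_eq, not_false_eq_true, if_true]

-- ===== VERDICT (by name: the statement is the Claim_ definition above) =====
theorem solve_spec : Claim_equal_solve := by
  unfold Claim_equal_solve
  intro cache n _hdom hpre
  unfold Spec_solve
  by_cases h3 : n < 3
  · simp only [solve, solveAuxA, solve_alt, if_pos h3]
  by_cases he : n = 3
  · simp only [solve, solveAuxA, solve_alt, if_neg h3, if_pos he]
  have hn4 : 4 ≤ n := by omega
  have hlen : n < (cache.length : Int) := by
    rcases hpre with h | h
    · omega
    · exact h
  have hA := A_main (n.toNat + 1) cache cache n (by omega) ⟨rfl, fun j => Or.inl rfl⟩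
  show (solveAuxA (n.toNat + 1) cache n).1 = solve_alt cache n
  rw [hA.1]
  have hget : PySem.List.pyGet? cache n = some (cache[n.toNat]'(by omega)) := by
    rw [PySem.List.pyGet?_of_nonneg cache (by omega), List.getElem?_eq_getElem (by omega)]
  by_cases hw : cache[n.toNat]'(by omega) = -1
  · have hcastN : ((n.toNat + 1 : Nat) : Int) = n + 1 := by omega
    have htab := B_table cache (n.toNat + 1)
    rw [hcastN] at htab
    simp only [solve_alt, if_neg h3, if_neg he, hget, hw, ne_eq, not_true_eq_false, if_false,
      htab]
    rw [PySem.List.pyGetD_eq_getElem _ _ (by omega) (by simp only [List.length_map, List.length_range]; omega)]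
    have hgetm : ((List.range (n.toNat + 1)).map (fun j => valF (j+1) cache (j : Int)))[n.toNat]'(by simp)
        = valF (n.toNat + 1) cache ((n.toNat : Nat) : Int) := by
      simp
    rw [hgetm, Int.toNat_of_nonneg (by omega : (0:Int) ≤ n)]
  · simp only [solve_alt, if_neg h3, if_neg he, hget, hw, ne_eq, not_false_eq_true, if_true,
      valF]
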